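-- pv_equiv track=rewrite | github.com/RomainChiaraviglio/Poker | data_generator.py | brelan
-- ===== SOURCE A (Python) =====
-- def brelan(num):
-- 	list_brelan = []
-- 	for n in set(num):
-- 		if num.count(n) == 3:
-- 			list_brelan.append(n)
-- 	if len(list_brelan) == 2:
-- 		return [max(list_brelan), min(list_brelan)]
-- 	elif len(list_brelan) == 1:
-- 		return list_brelan
-- 	return None
-- ===== SOURCE B (Python) =====
-- def brelan(num):
--     s = sorted(num)
--     runs = []
--     i = 0
--     n = len(s)
--     while i < n:
--         j = i + 1
--         while j < n and s[j] == s[i]: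
--             j += 1
--         if j - i == 3:
--             runs.append(s[i])
--         i = j
--     if len(runs) == 2:
--         return [runs[1], runs[0]]
--     if len(runs) == 1:
--         return runs
--     return None
-- ===== Notes on version B (the rewrite author's own statement) =====
-- stated objective: faster
-- what changed: Replaces the per-distinct-value num.count scan over set(num) with a single sort followed by one run-length walk over the sorted list.
import Mathlib
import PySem

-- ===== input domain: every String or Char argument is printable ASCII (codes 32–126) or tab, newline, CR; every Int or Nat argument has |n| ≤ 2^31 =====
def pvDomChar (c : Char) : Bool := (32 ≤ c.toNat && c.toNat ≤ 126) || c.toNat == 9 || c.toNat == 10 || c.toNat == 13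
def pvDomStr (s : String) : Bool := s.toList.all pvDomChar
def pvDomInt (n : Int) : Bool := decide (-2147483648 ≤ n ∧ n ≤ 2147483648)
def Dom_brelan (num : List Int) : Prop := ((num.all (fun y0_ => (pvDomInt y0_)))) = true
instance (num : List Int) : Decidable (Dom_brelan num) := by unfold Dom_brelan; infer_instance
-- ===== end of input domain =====

-- B replaces A's per-distinct-value num.count scan with one sort plus a run-length walk (faster).


-- ===== PORT A =====
-- for n in set(num): if num.count(n) == 3: list_brelan.append(n)
-- then return [max, min] / the singleton / None by length.
def brelan (num : List Int) : Option (List Int) :=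
  let list_brelan := (PySem.Set.ofList num).foldl
    (fun acc n => if PySem.List.count num n = 3 then acc ++ [n] else acc) []
  if list_brelan.length = 2 then
    -- max(list_brelan)/min(list_brelan); the none branch is unreachable (length = 2)
    match PySem.List.max? list_brelan (fun x => x), PySem.List.min? list_brelan (fun x => x) with
    | some mx, some mn => some [mx, mn]
    | _, _ => none
  else if list_brelan.length = 1 then some list_brelan
  else none

-- ===== PORT B =====
-- the run-length walk of Source B over the sorted list: one run per recursive step,
-- keep the value when the run has length exactly 3
def altRuns : List Int → List Int
  | [] => []
  | x :: xs =>
    if (xs.takeWhile (fun y => y == x)).length + 1 = 3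
    then x :: altRuns (xs.dropWhile (fun y => y == x))
    else altRuns (xs.dropWhile (fun y => y == x))
termination_by l => l.length
decreasing_by all_goals simpa using Nat.lt_succ_of_le (List.length_dropWhile_le _ _)

def brelan_alt (num : List Int) : Option (List Int) :=
  match altRuns (PySem.List.sorted num (fun x => x)) with
  | [a, b] => some [b, a]      -- runs is ascending: [runs[1], runs[0]]
  | [a] => some [a]
  | _ => none

-- ===== PRECONDITION & SPEC =====
def Spec_brelan (num : List Int) (out : Option (List Int)) : Prop := out = brelan_alt num
instance (num : List Int) (out : Option (List Int)) : Decidable (Spec_brelan num out) := by unfold Spec_brelan; infer_instance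

-- ===== CLAIM (what is proved, stated in full; the proofs are below) =====
def Claim_equal_brelan : Prop := ∀ (num : List Int), Dom_brelan num → Spec_brelan num (brelan num)

-- ===== LEMMAS AND PROOFS =====

-- elements past the run of the head of a ≤-sorted list are strictly greater
theorem drop_run_gt {x : Int} {xs : List Int} (hp : (x :: xs).Pairwise (· ≤ ·)) :
    ∀ v ∈ xs.dropWhile (fun y => y == x), x < v := by
  intro v hv
  have hle : ∀ y ∈ xs, x ≤ y := fun y hy => (List.pairwise_cons.mp hp).1 y hy
  have hsub := (List.dropWhile_sublist (l := xs) (fun y => y == x))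
  have hps : (xs.dropWhile (fun y => y == x)).Pairwise (· ≤ ·) :=
    ((List.pairwise_cons.mp hp).2).sublist hsub
  cases hd : xs.dropWhile (fun y => y == x) with
  | nil => rw [hd] at hv; simp at hv
  | cons h t =>
    have hne : ¬ (h == x) = true := by
      have := List.head_dropWhile_not (fun y => y == x) (l := xs) (by rw [hd]; simp)
      simpa [hd] using this
    have hhx : h ≠ x := by simpa using hne
    have hxh : x < h := lt_of_le_of_ne (hle h (hsub.subset (hd ▸ List.mem_cons_self))) (Ne.symm hhx)
    rw [hd] at hv hps
    rcases List.mem_cons.mp hv with rfl | hv'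
    · exact hxh
    · exact lt_of_lt_of_le hxh ((List.pairwise_cons.mp hps).1 v hv')

theorem count_drop_run_of_ne {x v : Int} {xs : List Int} (hvx : v ≠ x) :
    (x :: xs).count v = (xs.dropWhile (fun y => y == x)).count v := by
  conv_lhs => rw [← List.takeWhile_append_dropWhile (p := fun y => y == x) (l := xs)]
  have h1 : (xs.takeWhile (fun y => y == x)).count v = 0 := by
    rw [List.count_eq_zero]
    intro hv
    exact hvx (by simpa using List.mem_takeWhile_imp hv)
  rw [List.count_cons, List.count_append, h1]
  simp [Ne.symm hvx]

theorem count_head_run {x : Int} {xs : List Int} (hp : (x :: xs).Pairwise (· ≤ ·)) :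
    (x :: xs).count x = (xs.takeWhile (fun y => y == x)).length + 1 := by
  conv_lhs => rw [← List.takeWhile_append_dropWhile (p := fun y => y == x) (l := xs)]
  have h1 : (xs.takeWhile (fun y => y == x)).count x = (xs.takeWhile (fun y => y == x)).length := by
    apply List.count_eq_length.mpr
    intro y hy
    have hyx : y = x := by simpa using List.mem_takeWhile_imp hy
    exact hyx.symm
  have h2 : (xs.dropWhile (fun y => y == x)).count x = 0 := by
    rw [List.count_eq_zero]
    intro hx
    exact absurd (drop_run_gt hp x hx) (lt_irrefl x)
  rw [List.count_cons, List.count_append, h1, h2]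
  simp

theorem pairwise_drop_run {x : Int} {xs : List Int} (hp : (x :: xs).Pairwise (· ≤ ·)) :
    (xs.dropWhile (fun y => y == x)).Pairwise (· ≤ ·) :=
  ((List.pairwise_cons.mp hp).2).sublist (List.dropWhile_sublist _)

-- a value distinct from the head is in the sorted cons iff it survives the head's run
theorem mem_drop_run_of_ne {x v : Int} {xs : List Int} (hvx : v ≠ x) :
    (v ∈ x :: xs ↔ v ∈ xs.dropWhile (fun y => y == x)) := by
  constructor
  · intro h
    rcases List.mem_cons.mp h with rfl | h'
    · exact absurd rfl hvx
    · conv at h' => rw [← List.takeWhile_append_dropWhile (p := fun y => y == x) (l := xs)]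
      rcases List.mem_append.mp h' with h'' | h''
      · exact absurd (by simpa using List.mem_takeWhile_imp h'') hvx
      · exact h''
  · intro h
    exact List.mem_cons_of_mem _ ((List.dropWhile_sublist _).subset h)

-- membership in altRuns s, for sorted s: exactly the values with count 3
theorem mem_altRuns {s : List Int} (hp : s.Pairwise (· ≤ ·)) :
    ∀ v, v ∈ altRuns s ↔ v ∈ s ∧ s.count v = 3 := by
  induction s using altRuns.induct with
  | case1 => intro v; simp [altRuns]
  | case2 x xs hc ih =>
    intro v
    have ih' := ih (pairwise_drop_run hp)
    rw [altRuns, if_pos hc]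
    by_cases hvx : v = x
    · subst hvx
      have hcnt := count_head_run hp
      constructor
      · intro _
        exact ⟨List.mem_cons_self, by rw [hcnt]; exact hc⟩
      · intro _
        exact List.mem_cons_self
    · have hcd := count_drop_run_of_ne (xs := xs) hvx
      rw [List.mem_cons, ih' v, hcd]
      constructor
      · rintro (rfl | ⟨hm, hc3⟩)
        · exact absurd rfl hvx
        · exact ⟨(mem_drop_run_of_ne hvx).mpr hm, hc3⟩
      · rintro ⟨hm, hc3⟩
        exact Or.inr ⟨(mem_drop_run_of_ne hvx).mp hm, hc3⟩
  | case3 x xs hc ih =>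
    intro v
    have ih' := ih (pairwise_drop_run hp)
    rw [altRuns, if_neg hc]
    by_cases hvx : v = x
    · subst hvx
      have hcnt := count_head_run hp
      have hnot : v ∉ altRuns (xs.dropWhile (fun y => y == v)) := by
        intro h
        exact absurd (drop_run_gt hp v ((ih' v).mp h).1) (lt_irrefl v)
      simp only [hnot, false_iff]
      intro hAnd
      exact hc (hcnt ▸ hAnd.2)
    · have hcd := count_drop_run_of_ne (xs := xs) hvx
      rw [ih' v, hcd, ← mem_drop_run_of_ne hvx]

theorem pairwise_altRuns {s : List Int} (hp : s.Pairwise (· ≤ ·)) :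
    (altRuns s).Pairwise (· < ·) := by
  induction s using altRuns.induct with
  | case1 => simp [altRuns]
  | case2 x xs hc ih =>
    rw [altRuns, if_pos hc]
    refine List.pairwise_cons.mpr ⟨?_, ih (pairwise_drop_run hp)⟩
    intro v hv
    exact drop_run_gt hp v ((mem_altRuns (pairwise_drop_run hp) v).mp hv).1
  | case3 x xs hc ih =>
    rw [altRuns, if_neg hc]
    exact ih (pairwise_drop_run hp)

-- A's accumulated list is a filter of the ordered dedup
theorem brelan_list_eq (num : List Int) :
    (PySem.Set.ofList num).foldl
      (fun acc n => if PySem.List.count num n = 3 then acc ++ [n] else acc) []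
    = (PySem.Set.ofList num).filter (fun n => decide (PySem.List.count num n = 3)) := by
  rw [PySem.List.foldl_append_ite_eq_filter]
  simp

-- ===== VERDICT (by name: the statement is the Claim_ definition above) =====
theorem brelan_spec : Claim_equal_brelan := by
  intro num _
  unfold Spec_brelan brelan brelan_alt
  simp only [brelan_list_eq]
  set s := PySem.List.sorted num (fun x => x) with hs
  have hsp : s.Pairwise (· ≤ ·) := PySem.List.sorted_pairwise num (fun x => x)
  have hperm : s.Perm num := PySem.List.sorted_perm num (fun x => x) false
  set LA := (PySem.Set.ofList num).filter (fun n => decide (PySem.List.count num n = 3)) with hLA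
  set LB := altRuns s with hLB
  have hmemA : ∀ v, v ∈ LA ↔ v ∈ num ∧ num.count v = 3 := by
    intro v
    rw [hLA, List.mem_filter, PySem.Set.mem_ofList]
    simp [PySem.List.count]
  have hmemB : ∀ v, v ∈ LB ↔ v ∈ num ∧ num.count v = 3 := by
    intro v
    rw [hLB, mem_altRuns hsp v, hperm.mem_iff, hperm.count_eq]
  have hndA : LA.Nodup := (PySem.Set.nodup_ofList num).filter _
  have hpwB : LB.Pairwise (· < ·) := pairwise_altRuns hsp
  have hndB : LB.Nodup := hpwB.imp (fun h => ne_of_lt h)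
  have hAB : LA.Perm LB :=
    (List.perm_ext_iff_of_nodup hndA hndB).mpr (fun v => (hmemA v).trans (hmemB v).symm)
  have hlen : LA.length = LB.length := hAB.length_eq
  cases hB : LB with
  | nil =>
    rw [hB] at hAB
    have hA0 : LA = [] := hAB.eq_nil
    rw [hA0]
    simp
  | cons a t =>
    rw [hB] at hAB hpwB hlen
    cases t with
    | nil =>
      have hA1 : LA = [a] := List.perm_singleton.mp hAB
      rw [hA1]
      simp
    | cons b t2 =>
      cases t2 with
      | nil =>
        have hab : a < b := (List.pairwise_cons.mp hpwB).1 b (by simp)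
        have hlen2 : LA.length = 2 := by rw [hAB.length_eq]; rfl
        rw [if_pos hlen2]
        have hmemLA : ∀ v, v ∈ LA ↔ v = a ∨ v = b := by
          intro v
          rw [hAB.mem_iff]; simp
        cases hmx : PySem.List.max? LA (fun x => x) with
        | none =>
          have : LA = [] := (PySem.List.max?_eq_none_iff LA _).mp hmx
          rw [this] at hlen2; simp at hlen2
        | some mx =>
          cases hmn : PySem.List.min? LA (fun x => x) with
          | none =>
            have : LA = [] := (PySem.List.min?_eq_none_iff LA _).mp hmn
            rw [this] at hlen2; simp at hlen2
          | some mn =>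
            have hmxmem := (hmemLA mx).mp (PySem.List.max?_mem hmx)
            have hmnmem := (hmemLA mn).mp (PySem.List.min?_mem hmn)
            have hamem : a ∈ LA := (hmemLA a).mpr (Or.inl rfl)
            have hbmem : b ∈ LA := (hmemLA b).mpr (Or.inr rfl)
            have hmx_b : mx = b := by
              have h1 := PySem.List.max?_isMax hmx b hbmem
              rcases hmxmem with rfl | rfl
              · exact absurd h1 (not_le.mpr hab)
              · rfl
            have hmn_a : mn = a := by
              have h1 := PySem.List.min?_isMin hmn a hamem
              rcases hmnmem with rfl | rfl
              · rfl
              · exact absurd h1 (not_le.mpr hab)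
            simp [hmx_b, hmn_a]
      | cons c t3 =>
        rw [if_neg (by rw [hlen]; simp), if_neg (by rw [hlen]; simp)]
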